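-- pv_equiv track=rewrite | github.com/wyk18703232953/myResearch | codeComplex/data/filteredData/python/nlogn/python_nlogn_0349.py | core_logic
-- ===== SOURCE A (Python) =====
-- def core_logic(arr):
--     sett = set(arr)
--     ans = [arr[0]]
--     flag = 0
--     for x in range(31):
--         d = 1 << x
--         for i in arr:
--             if (i - d) in sett and (i + d) in sett:
--                 ans = [i - d, i, i + d]
--                 flag = 1
--                 break
--             elif (i - d) in sett:
--                 ans = [i - d, i]
--             elif (i + d) in sett:
--                 ans = [i, i + d]
--         if flag:
--             break
--     return ans
-- ===== SOURCE B (Python) =====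
-- def core_logic(arr):
--     sett = set(arr)
--     # pass 1: first (power, element) whose both neighbours at distance d exist -> triple
--     for x in range(31):
--         d = 1 << x
--         for i in arr:
--             if i - d in sett and i + d in sett:
--                 return [i - d, i, i + d]
--     # pass 2: no triple anywhere, so the last matching pair over the same order wins
--     ans = [arr[0]]
--     for x in range(31):
--         d = 1 << x
--         for i in arr:
--             if i - d in sett:
--                 ans = [i - d, i]
--             elif i + d in sett:
--                 ans = [i, i + d]
--     return ans
-- ===== Notes on version B (the rewrite author's own statement) =====
-- stated objective: alternative
-- what changed: Replaces A's single nested loop with a flag and overwritten accumulator by two explicit passes: an early-return search for the first triple, then (only if none exists) a plain fold tracking the last matching pair.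
import Mathlib
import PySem

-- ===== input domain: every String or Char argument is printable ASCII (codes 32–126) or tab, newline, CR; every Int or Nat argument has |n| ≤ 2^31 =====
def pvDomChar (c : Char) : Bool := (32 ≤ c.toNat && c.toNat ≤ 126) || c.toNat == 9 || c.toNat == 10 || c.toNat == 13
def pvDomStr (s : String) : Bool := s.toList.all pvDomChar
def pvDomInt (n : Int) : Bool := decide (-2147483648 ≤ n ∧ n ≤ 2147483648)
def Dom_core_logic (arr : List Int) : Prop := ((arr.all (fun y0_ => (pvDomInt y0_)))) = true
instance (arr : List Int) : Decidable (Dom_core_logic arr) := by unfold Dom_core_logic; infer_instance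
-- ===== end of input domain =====

-- B replaces A's flag-carrying nested loop by two explicit passes (first-triple search, then last-pair fold);
-- same cost, different decomposition. Equivalence is about the return value on non-empty arr (A raises IndexError on []).

-- ===== PORT A =====
-- inner 'for i in arr' loop: state is ans; returns (ans, flag); break on triple
def pvInnerA (sett : PySem.Set Int) (d : Int) : List Int → List Int → (List Int × Bool)
  | [], ans => (ans, false)
  | i :: rest, ans =>
    if sett.contains (i - d) && sett.contains (i + d) then ([i - d, i, i + d], true)
    else if sett.contains (i - d) then pvInnerA sett d rest [i - d, i]
    else if sett.contains (i + d) then pvInnerA sett d rest [i, i + d]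
    else pvInnerA sett d rest ans

-- outer 'for x in range(31)' loop; 1 << x ported as 2 ^ x (equal for 0 ≤ x)
def pvOuterA (sett : PySem.Set Int) (arr : List Int) : List Nat → List Int → List Int
  | [], ans => ans
  | x :: xs, ans =>
    let r := pvInnerA sett ((2 : Int) ^ x) arr ans
    if r.2 then r.1 else pvOuterA sett arr xs r.1

def core_logic (arr : List Int) : List Int :=
  match arr with
  | [] => []  -- Python raises IndexError indexing the first element; excluded by Pre_core_logic
  | h :: _ => pvOuterA (PySem.Set.ofList arr) arr (List.range 31) [h]

-- ===== PORT B =====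
-- pass 1 inner: first triple in arr for this d, if any
def pvFindTripleIn (sett : PySem.Set Int) (d : Int) : List Int → Option (List Int)
  | [] => none
  | i :: rest =>
    if sett.contains (i - d) && sett.contains (i + d) then some [i - d, i, i + d]
    else pvFindTripleIn sett d rest

-- pass 1 outer: first triple over the powers, if any
def pvFindTriple (sett : PySem.Set Int) (arr : List Int) : List Nat → Option (List Int)
  | [] => none
  | x :: xs =>
    match pvFindTripleIn sett ((2 : Int) ^ x) arr with
    | some t => some t
    | none => pvFindTriple sett arr xs

-- pass 2 inner: fold keeping the last matching pair
def pvLastPairIn (sett : PySem.Set Int) (d : Int) (arr : List Int) (ans : List Int) : List Int :=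
  arr.foldl (fun ans i =>
    if sett.contains (i - d) then [i - d, i]
    else if sett.contains (i + d) then [i, i + d]
    else ans) ans

-- pass 2 outer
def pvPass2 (sett : PySem.Set Int) (arr : List Int) (xs : List Nat) (ans : List Int) : List Int :=
  xs.foldl (fun ans x => pvLastPairIn sett ((2 : Int) ^ x) arr ans) ans

def core_logic_alt (arr : List Int) : List Int :=
  match arr with
  | [] => []  -- Python raises IndexError indexing the first element; excluded by Pre_core_logic
  | h :: _ =>
    let sett := PySem.Set.ofList arr
    match pvFindTriple sett arr (List.range 31) with
    | some t => t
    | none => pvPass2 sett arr (List.range 31) [h]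

-- ===== PRECONDITION & SPEC =====
-- Pre_ excludes exactly the empty list, on which the Python A raises IndexError indexing the first element.
def Pre_core_logic (arr : List Int) : Prop := arr ≠ []
instance (arr : List Int) : Decidable (Pre_core_logic arr) := by unfold Pre_core_logic; infer_instance
def pvWitness_core_logic : List Int := ([1, 2, 3])
def Spec_core_logic (arr : List Int) (out : List Int) : Prop := out = core_logic_alt arr
instance (arr : List Int) (out : List Int) : Decidable (Spec_core_logic arr out) := by unfold Spec_core_logic; infer_instance

-- ===== CLAIM (what is proved, stated in full; the proofs are below) =====
def Claim_equal_core_logic : Prop := ∀ (arr : List Int), Dom_core_logic arr → Pre_core_logic arr → Spec_core_logic arr (core_logic arr)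

-- ===== LEMMAS AND PROOFS =====

-- A's inner loop = (first triple if any, else last-pair fold, with the break flag)
theorem pvInnerA_eq (sett : PySem.Set Int) (d : Int) (l : List Int) (ans : List Int) :
    pvInnerA sett d l ans =
      match pvFindTripleIn sett d l with
      | some t => (t, true)
      | none => (pvLastPairIn sett d l ans, false) := by
  induction l generalizing ans with
  | nil => simp [pvInnerA, pvFindTripleIn, pvLastPairIn]
  | cons i rest ih =>
    by_cases hl : i - d ∈ sett <;> by_cases hr : i + d ∈ sett <;>
      simp [pvInnerA, pvFindTripleIn, pvLastPairIn, hl, hr, ih]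

-- A's outer loop = first triple over the powers, else pass-2 fold
theorem pvOuterA_eq (sett : PySem.Set Int) (arr : List Int) (xs : List Nat) (ans : List Int) :
    pvOuterA sett arr xs ans =
      match pvFindTriple sett arr xs with
      | some t => t
      | none => pvPass2 sett arr xs ans := by
  induction xs generalizing ans with
  | nil => simp [pvOuterA, pvFindTriple, pvPass2]
  | cons x xs ih =>
    rw [pvOuterA, pvInnerA_eq]
    cases htrip : pvFindTripleIn sett ((2 : Int) ^ x) arr with
    | some t => simp [pvFindTriple, htrip]
    | none => simp [pvFindTriple, htrip, ih, pvPass2, List.foldl]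

-- ===== VERDICT (by name: the statement is the Claim_ definition above) =====
theorem core_logic_spec : Claim_equal_core_logic := by
  intro arr _ hpre
  unfold Spec_core_logic core_logic core_logic_alt
  match arr with
  | [] => exact absurd rfl hpre
  | h :: t => simp [pvOuterA_eq]
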